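-- pv_equiv track=rewrite | github.com/davicasg/woobsing | view.py | words_into_url
-- ===== SOURCE A (Python) =====
-- def words_into_url(url:str)-> list:
--     """
--     Función que recibe como parametro una url cualquiera y retorna una lista con las palabras encontradas
--     """
--     cont = 0
--     list_words = []# lista que contendra todas las palabras encontradas en la url
--     found_word = []# lista que contiene las letras de una nueva posible palabra encontrada
--     special_characters = [".","/","?q","+","_","-","&","=","//",":","%","?","#","$"]# caracteres que generalmente indican el final o separación de una palabra
--     numbers = ['1','2','3','4','5','6','7','8','9','0']# lista de numeros enteros como string's
--     url_separator = url.partition("https://")#Se utiliza el método partition para separar la parte de la url que se va a operar, es decir, no se tiene en cuenta la parte del "http..."  debido a que es común en cualquier url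
--
--     if url_separator[2] == '':
--         url_separator = url.partition("http://")
--
--     string_to_evaluate = url_separator[2] #parte de la url a evaluar, lo que sigue despues de "https://" o "http://"
--
--     for character in string_to_evaluate: #evalua cada caracter de la url
--         cont += 1
--
--         if character in special_characters or character in numbers: #si la letra es un caracter o un numero no la tiene en cuenta e indica el final de una posible palabra
--             add_word_to_list(found_word,list_words)
--             found_word.clear()#Se limpia la lista que forma la palabra
--
--         elif len(string_to_evaluate) == cont: # se evalua si es la ultima iteración para que se incluida la ultima palabra y/o letra
--             found_word.append(character)# Se agrega la letra que formará una posible palabra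
--             add_word_to_list(found_word,list_words)
--
--         else:
--             found_word.append(character)# Se agrega la letra que formará una posible palabra
--
--     return list_words
--
-- def add_word_to_list(found_word:str,list_words:list[str]):
--     """
--     Función que incluye una palabra a una listado de palabras
--     """
--     list_words.append(''.join(found_word))# Se agrega la nueva palabra al listado
--     if len(list_words[-1]) <= 1: #evalue si la palabra contiene sola una letra para quitarla del listado
--         del list_words[-1]
-- ===== SOURCE B (Python) =====
-- import re
--
-- _SEPARATORS = [".", "/", "?q", "+", "_", "-", "&", "=", "//", ":", "%", "?", "#", "$"]
-- # only the single-character entries can ever match one character; digits also end a word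
-- _SPLIT_RE = re.compile("[" + re.escape("".join(s for s in _SEPARATORS if len(s) == 1)) + "0-9]")
--
--
-- def words_into_url(url: str) -> list:
--     tail = url.partition("https://")[2]
--     if tail == '':
--         tail = url.partition("http://")[2]
--     return [w for w in _SPLIT_RE.split(tail) if len(w) > 1]
-- ===== Notes on version B (the rewrite author's own statement) =====
-- stated objective: idiomatic
-- what changed: Replaces A's per-character loop with its cont counter, found_word accumulator and append-then-delete word flushing by a compiled regex character-class split (single-char separators plus digits) of the partitioned tail followed by a single length>1 filter.
import Mathlib
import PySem

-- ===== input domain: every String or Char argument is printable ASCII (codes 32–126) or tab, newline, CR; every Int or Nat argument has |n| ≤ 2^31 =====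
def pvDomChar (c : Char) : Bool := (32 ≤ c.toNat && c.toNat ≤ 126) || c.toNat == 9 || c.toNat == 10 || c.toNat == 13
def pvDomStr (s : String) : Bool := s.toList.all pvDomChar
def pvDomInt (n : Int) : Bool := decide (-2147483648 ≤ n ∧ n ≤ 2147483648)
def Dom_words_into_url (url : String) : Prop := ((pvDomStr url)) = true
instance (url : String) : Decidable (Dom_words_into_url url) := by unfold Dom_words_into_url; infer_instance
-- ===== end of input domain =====

-- B replaces A's per-character accumulator loop by a regex-class split (split at single-char separators and digits) followed by a length>1 filter; objective: idiomatic.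

-- ===== PORT A =====
-- str.partition(sep): first occurrence of sep splits s into (before, sep, after); (s,'','') if absent
def pvPartition (s sep : List Char) : List Char × List Char × List Char :=
  let i := PySem.Chars.find s sep
  if i = -1 then (s, [], [])
  else (s.take i.toNat, sep, s.drop (i.toNat + sep.length))

def pvSpecialChars : List (List Char) :=
  [['.'], ['/'], ['?','q'], ['+'], ['_'], ['-'], ['&'], ['='], ['/','/'], [':'], ['%'], ['?'], ['#'], ['$']]

def pvNumbers : List Char := ['1','2','3','4','5','6','7','8','9','0']

-- add_word_to_list: append the joined word, then delete it again if its length is ≤ 1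
def pvAddWord (foundWord : List Char) (listWords : List (List Char)) : List (List Char) :=
  let lw := listWords ++ [foundWord]
  if foundWord.length ≤ 1 then lw.dropLast else lw

-- one iteration of A's for-loop; state = (cont, found_word, list_words)
def pvStepA (fullLen : Nat) (st : Nat × List Char × List (List Char)) (c : Char) :
    Nat × List Char × List (List Char) :=
  let cont := st.1 + 1
  if pvSpecialChars.contains [c] || pvNumbers.contains c then
    (cont, [], pvAddWord st.2.1 st.2.2)
  else if fullLen = cont then
    (cont, st.2.1 ++ [c], pvAddWord (st.2.1 ++ [c]) st.2.2)
  else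
    (cont, st.2.1 ++ [c], st.2.2)

def words_into_url (url : String) : List String :=
  let u := url.toList
  let sep1 := pvPartition u "https://".toList
  let sep := if sep1.2.2 = [] then pvPartition u "http://".toList else sep1
  let s := sep.2.2
  let st := s.foldl (pvStepA s.length) (0, [], [])
  st.2.2.map String.ofList

-- ===== PORT B =====
def pvSeparatorsB : List (List Char) :=
  [['.'], ['/'], ['?','q'], ['+'], ['_'], ['-'], ['&'], ['='], ['/','/'], [':'], ['%'], ['?'], ['#'], ['$']]

-- the compiled character class: single-character separators plus 0-9
def pvClsB : List Char :=
  (pvSeparatorsB.filter (fun s => s.length == 1)).flatten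
    ++ ['0','1','2','3','4','5','6','7','8','9']

-- port of re.split on a character class: split the string at every character of cls
def pvSplitClass (cls : List Char) : List Char → List (List Char)
  | [] => [[]]
  | c :: rest =>
    if cls.contains c then [] :: pvSplitClass cls rest
    else
      match pvSplitClass cls rest with
      | [] => [[c]]
      | t :: ts => (c :: t) :: ts

def words_into_url_alt (url : String) : List String :=
  let u := url.toList
  let tail1 := (pvPartition u "https://".toList).2.2
  let tail := if tail1 = [] then (pvPartition u "http://".toList).2.2 else tail1
  ((pvSplitClass pvClsB tail).filter (fun w => 1 < w.length)).map String.ofList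

-- ===== PRECONDITION & SPEC =====
def Spec_words_into_url (url : String) (out : List String) : Prop := out = words_into_url_alt url
instance (url : String) (out : List String) : Decidable (Spec_words_into_url url out) := by unfold Spec_words_into_url; infer_instance

-- ===== CLAIM (what is proved, stated in full; the proofs are below) =====
def Claim_equal_words_into_url : Prop := ∀ (url : String), Dom_words_into_url url → Spec_words_into_url url (words_into_url url)

-- ===== LEMMAS AND PROOFS =====

-- the two separator tests agree character by character
theorem pvClsB_eval :
    pvClsB = ['.', '/', '+', '_', '-', '&', '=', ':', '%', '?', '#', '$',
              '0', '1', '2', '3', '4', '5', '6', '7', '8', '9'] := by decide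

theorem pvSep_eq (c : Char) :
    (pvSpecialChars.contains [c] || pvNumbers.contains c) = pvClsB.contains c := by
  rw [pvClsB_eval, Bool.eq_iff_iff]
  simp [pvSpecialChars, pvNumbers]
  tauto

theorem pvAddWord_eq (f : List Char) (w : List (List Char)) :
    pvAddWord f w = if 1 < f.length then w ++ [f] else w := by
  simp only [pvAddWord, List.dropLast_concat]
  by_cases h : 1 < f.length
  · rw [if_neg (by omega), if_pos h]
  · rw [if_pos (by omega), if_neg h]

-- A's loop, freed from the counter: the "last iteration" test becomes rest = []
def pvGo (found : List Char) (words : List (List Char)) : List Char → List (List Char)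
  | [] => words
  | c :: rest =>
    if pvClsB.contains c then pvGo [] (pvAddWord found words) rest
    else if rest = [] then pvAddWord (found ++ [c]) words
    else pvGo (found ++ [c]) words rest

theorem pvLoopA (fullLen : Nat) :
    ∀ (rest : List Char) (k : Nat) (found : List Char) (words : List (List Char)),
      k + rest.length = fullLen →
      (rest.foldl (pvStepA fullLen) (k, found, words)).2.2 = pvGo found words rest := by
  intro rest
  induction rest with
  | nil => intro k found words _; simp [pvGo]
  | cons c rest ih =>
    intro k found words hlen
    simp only [List.foldl_cons, pvStepA, pvGo, pvSep_eq]
    by_cases hsep : pvClsB.contains c = true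
    · simp only [hsep, if_true]
      exact ih (k + 1) [] (pvAddWord found words) (by simp at hlen ⊢; omega)
    · simp only [hsep, if_false, Bool.false_eq_true]
      rcases rest with _ | ⟨d, rest'⟩
      · have : fullLen = k + 1 := by simpa using hlen.symm
        simp [this]
      · have hne : fullLen ≠ k + 1 := by simp at hlen; omega
        simp only [hne, if_false, reduceCtorEq]
        exact ih (k + 1) (found ++ [c]) words (by simp at hlen ⊢; omega)

theorem pvSplitClass_ne_nil (cls : List Char) (s : List Char) : pvSplitClass cls s ≠ [] := by
  cases s with
  | nil => simp [pvSplitClass]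
  | cons c rest =>
    simp only [pvSplitClass]
    split
    · simp
    · split <;> simp

def pvPrepend (found : List Char) : List (List Char) → List (List Char)
  | [] => [found]
  | t :: ts => (found ++ t) :: ts

theorem pvSplit_cons_mem (cls : List Char) (c : Char) (rest : List Char) (hc : c ∈ cls) :
    pvSplitClass cls (c :: rest) = [] :: pvSplitClass cls rest := by
  simp [pvSplitClass, hc]

theorem pvSplit_cons_not_mem (cls : List Char) (c : Char) (rest t : List Char)
    (ts : List (List Char)) (hc : c ∉ cls) (ht : pvSplitClass cls rest = t :: ts) :
    pvSplitClass cls (c :: rest) = (c :: t) :: ts := by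
  simp [pvSplitClass, hc, ht]

theorem pvGo_cons_mem (found : List Char) (words : List (List Char)) (c : Char)
    (rest : List Char) (hc : c ∈ pvClsB) :
    pvGo found words (c :: rest) = pvGo [] (pvAddWord found words) rest := by
  simp [pvGo, hc]

theorem pvGo_single_not_mem (found : List Char) (words : List (List Char)) (c : Char)
    (hc : c ∉ pvClsB) :
    pvGo found words [c] = pvAddWord (found ++ [c]) words := by
  simp [pvGo, hc]

theorem pvGo_cons_not_mem (found : List Char) (words : List (List Char)) (c : Char)
    (rest : List Char) (hc : c ∉ pvClsB) (hr : rest ≠ []) :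
    pvGo found words (c :: rest) = pvGo (found ++ [c]) words rest := by
  simp [pvGo, hc, hr]

theorem pvSplit_exists_cons (cls s : List Char) :
    ∃ t ts, pvSplitClass cls s = t :: ts := by
  rcases h : pvSplitClass cls s with _ | ⟨t, ts⟩
  · exact absurd h (pvSplitClass_ne_nil _ _)
  · exact ⟨t, ts, rfl⟩

theorem pvGoSplit :
    ∀ (s : List Char) (found : List Char) (words : List (List Char)), s ≠ [] →
      pvGo found words s =
        words ++ (pvPrepend found (pvSplitClass pvClsB s)).filter (fun w => 1 < w.length) := by
  intro s
  induction s with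
  | nil => intro _ _ h; exact absurd rfl h
  | cons c rest ih =>
    intro found words _
    rcases rest with _ | ⟨d, rest'⟩
    · by_cases hc : c ∈ pvClsB
      · rw [pvGo_cons_mem found words c [] hc,
            pvSplit_cons_mem pvClsB c [] hc]
        show pvAddWord found words = _
        rw [pvAddWord_eq]
        simp only [pvSplitClass, pvPrepend, List.append_nil, List.filter_cons]
        by_cases h1 : 1 < found.length <;> simp [h1]
      · rw [pvGo_single_not_mem found words c hc,
            pvSplit_cons_not_mem pvClsB c [] [] [] hc (by simp [pvSplitClass])]
        rw [pvAddWord_eq]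
        simp only [pvPrepend, List.filter_cons, List.filter_nil]
        split_ifs with h1 <;> simp_all
    · obtain ⟨t, ts, ht⟩ := pvSplit_exists_cons pvClsB (d :: rest')
      by_cases hc : c ∈ pvClsB
      · rw [pvGo_cons_mem found words c (d :: rest') hc,
            ih [] (pvAddWord found words) (by simp),
            pvSplit_cons_mem pvClsB c (d :: rest') hc, ht]
        rw [pvAddWord_eq]
        simp only [pvPrepend, List.nil_append, List.filter_cons]
        by_cases h1 : 1 < found.length <;> simp [h1]
      · rw [pvGo_cons_not_mem found words c (d :: rest') hc (by simp),
            ih (found ++ [c]) words (by simp),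
            pvSplit_cons_not_mem pvClsB c (d :: rest') t ts hc ht, ht]
        simp [pvPrepend]

theorem pvMain (tail : List Char) :
    (tail.foldl (pvStepA tail.length) (0, [], [])).2.2 =
      (pvSplitClass pvClsB tail).filter (fun w => 1 < w.length) := by
  rcases tail with _ | ⟨c, rest⟩
  · simp [pvSplitClass]
  · rw [pvLoopA (c :: rest).length (c :: rest) 0 [] [] (by simp)]
    rw [pvGoSplit (c :: rest) [] [] (by simp)]
    obtain ⟨t, ts, ht⟩ : ∃ t ts, pvSplitClass pvClsB (c :: rest) = t :: ts := by
      rcases h : pvSplitClass pvClsB (c :: rest) with _ | ⟨t, ts⟩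
      · exact absurd h (pvSplitClass_ne_nil _ _)
      · exact ⟨t, ts, rfl⟩
    simp [ht, pvPrepend]

-- ===== VERDICT (by name: the statement is the Claim_ definition above) =====
theorem words_into_url_spec : Claim_equal_words_into_url := by
  intro url _
  show words_into_url url = words_into_url_alt url
  unfold words_into_url words_into_url_alt
  simp only [pvMain]
  congr 2
  split_ifs <;> rfl
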